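-- pv_equiv track=rewrite | github.com/jlovering/AdventOfCode2020 | Day24/day24-1.py | followToTile
-- ===== SOURCE A (Python) =====
-- VECTORS = {
--     'ne': (1,-1,0),
--     'e': (1,0,-1),
--     'se' : (0,1,-1),
--     'sw' : (-1,1,0),
--     'w' : (-1,0,1),
--     'nw' : (0,-1,1)
-- }
--
-- def followToTile(dirs):
--     possition = [0,0,0]
--     for d in dirs:
--         move = VECTORS[d]
--         possition[0] += move[0]
--         possition[1] += move[1]
--         possition[2] += move[2]
--
--     return tuple(possition)
-- ===== SOURCE B (Python) =====
-- VECTORS = {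
--     'ne': (1,-1,0),
--     'e': (1,0,-1),
--     'se' : (0,1,-1),
--     'sw' : (-1,1,0),
--     'w' : (-1,0,1),
--     'nw' : (0,-1,1)
-- }
--
-- def followToTile(dirs):
--     # tally directions first, then combine each distinct direction once
--     counts = {}
--     for d in dirs:
--         counts[d] = counts.get(d, 0) + 1
--     x = y = z = 0
--     for d, n in counts.items():
--         vx, vy, vz = VECTORS[d]
--         x += n * vx
--         y += n * vy
--         z += n * vz
--     return (x, y, z)
-- ===== Notes on version B (the rewrite author's own statement) =====
-- stated objective: alternative
-- what changed: B first builds a frequency table of the directions in one pass, then accumulates count-scaled VECTORS entries over the distinct direction keys, instead of adding one vector per list element.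
import Mathlib
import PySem

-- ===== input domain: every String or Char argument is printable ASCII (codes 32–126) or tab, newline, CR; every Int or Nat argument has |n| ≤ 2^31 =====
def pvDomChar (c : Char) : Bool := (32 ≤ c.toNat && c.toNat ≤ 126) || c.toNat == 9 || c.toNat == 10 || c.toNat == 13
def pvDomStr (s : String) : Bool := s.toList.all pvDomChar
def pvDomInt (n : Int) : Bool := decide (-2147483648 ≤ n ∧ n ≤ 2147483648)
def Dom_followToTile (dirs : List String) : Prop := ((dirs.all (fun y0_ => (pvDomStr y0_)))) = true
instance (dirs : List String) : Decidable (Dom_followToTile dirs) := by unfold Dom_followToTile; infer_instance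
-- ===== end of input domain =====

-- B tallies directions with a dict first and combines count-scaled vectors per distinct key; A adds one vector per element.

-- ===== PORT A =====
-- module constant VECTORS (shared by both Pythons)
def pvVECTORS : PySem.Dict String (Int × Int × Int) :=
  PySem.Dict.ofList [("ne", (1, -1, 0)), ("e", (1, 0, -1)), ("se", (0, 1, -1)),
                     ("sw", (-1, 1, 0)), ("w", (-1, 0, 1)), ("nw", (0, -1, 1))]

-- VECTORS[d]; the default is never reached under Pre_ (Python raises KeyError there)
def followToTile (dirs : List String) : Int × Int × Int :=
  dirs.foldl
    (fun pos d =>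
      let move := pvVECTORS.getD d (0, 0, 0)
      (pos.1 + move.1, pos.2.1 + move.2.1, pos.2.2 + move.2.2))
    (0, 0, 0)

-- ===== PORT B =====
def followToTile_alt (dirs : List String) : Int × Int × Int :=
  let counts : PySem.Dict String Int :=
    dirs.foldl (fun c d => c.insert d (c.getD d 0 + 1)) PySem.Dict.empty
  counts.items.foldl
    (fun acc p =>
      let v := pvVECTORS.getD p.1 (0, 0, 0)
      (acc.1 + p.2 * v.1, acc.2.1 + p.2 * v.2.1, acc.2.2 + p.2 * v.2.2))
    (0, 0, 0)

-- ===== PRECONDITION & SPEC =====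
-- Pre_ excludes directions outside VECTORS' keys, where both Pythons raise KeyError.
def Pre_followToTile (dirs : List String) : Prop :=
  ∀ d ∈ dirs, d ∈ ["ne", "e", "se", "sw", "w", "nw"]
instance (dirs : List String) : Decidable (Pre_followToTile dirs) := by unfold Pre_followToTile; infer_instance
def pvWitness_followToTile : List String := ["e", "ne", "e", "sw"]

def Spec_followToTile (dirs : List String) (out : Int × Int × Int) : Prop := out = followToTile_alt dirs
instance (dirs : List String) (out : Int × Int × Int) : Decidable (Spec_followToTile dirs out) := by unfold Spec_followToTile; infer_instance

-- ===== CLAIM (what is proved, stated in full; the proofs are below) =====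
def Claim_equal_followToTile : Prop := ∀ (dirs : List String), Dom_followToTile dirs → Pre_followToTile dirs → Spec_followToTile dirs (followToTile dirs)

-- ===== LEMMAS AND PROOFS =====
-- component-wise shift lemma for A's fold
theorem pvFoldA_shift (dirs : List String) (a : Int × Int × Int) :
    dirs.foldl
      (fun pos d =>
        let move := pvVECTORS.getD d (0, 0, 0)
        (pos.1 + move.1, pos.2.1 + move.2.1, pos.2.2 + move.2.2)) a
    = (a.1 + ((dirs.map (fun d => (pvVECTORS.getD d (0, 0, 0)).1)).sum),
       a.2.1 + ((dirs.map (fun d => (pvVECTORS.getD d (0, 0, 0)).2.1)).sum),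
       a.2.2 + ((dirs.map (fun d => (pvVECTORS.getD d (0, 0, 0)).2.2)).sum)) := by
  induction dirs generalizing a with
  | nil => simp
  | cons d ds ih => simp [List.foldl_cons, ih, Prod.ext_iff]; refine ⟨by ring, by ring, by ring⟩

-- component-wise shift lemma for B's combine fold
theorem pvFoldB_shift (l : List (String × Int)) (a : Int × Int × Int) :
    l.foldl
      (fun acc p =>
        let v := pvVECTORS.getD p.1 (0, 0, 0)
        (acc.1 + p.2 * v.1, acc.2.1 + p.2 * v.2.1, acc.2.2 + p.2 * v.2.2)) a
    = (a.1 + ((l.map (fun p => p.2 * (pvVECTORS.getD p.1 (0, 0, 0)).1)).sum),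
       a.2.1 + ((l.map (fun p => p.2 * (pvVECTORS.getD p.1 (0, 0, 0)).2.1)).sum),
       a.2.2 + ((l.map (fun p => p.2 * (pvVECTORS.getD p.1 (0, 0, 0)).2.2)).sum)) := by
  induction l generalizing a with
  | nil => simp
  | cons p ps ih => simp [List.foldl_cons, ih, Prod.ext_iff]; refine ⟨by ring, by ring, by ring⟩

theorem pvSum_single (K : List String) (hnd : K.Nodup) (d : String) (hd : d ∈ K) (f : String → Int) :
    ((K.map (fun k => if k = d then f k else 0)).sum) = f d := by
  induction K with
  | nil => simp at hd
  | cons k ks ih =>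
    simp only [List.map_cons, List.sum_cons]
    by_cases hk : k = d
    · subst hk
      rw [if_pos rfl]
      have hz : ((ks.map (fun x => if x = k then f x else 0)).sum) = 0 := by
        apply List.sum_eq_zero
        intro y hy
        obtain ⟨x, hx, rfl⟩ := List.mem_map.mp hy
        have hxk : x ≠ k := fun he => (List.nodup_cons.mp hnd).1 (he ▸ hx)
        simp [hxk]
      rw [hz]; ring
    · have hd' : d ∈ ks := by
        rcases List.mem_cons.mp hd with h | h
        · exact absurd h.symm hk
        · exact h
      rw [if_neg hk, ih (List.nodup_cons.mp hnd).2 hd']; ring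

-- ∑_{d ∈ dirs} f d = ∑_{k ∈ K} count(k) * f k, for K nodup and covering dirs
theorem pvSum_count (K : List String) (hnd : K.Nodup) (dirs : List String)
    (hcov : ∀ d ∈ dirs, d ∈ K) (f : String → Int) :
    ((K.map (fun k => ((dirs.count k : Int)) * f k)).sum) = ((dirs.map f).sum) := by
  induction dirs with
  | nil => simp
  | cons d ds ih =>
    have hcov' : ∀ x ∈ ds, x ∈ K := fun x hx => hcov x (List.mem_cons_of_mem _ hx)
    have hstep : ∀ k, ((((d :: ds).count k : Int)) * f k)
        = ((ds.count k : Int)) * f k + (if k = d then f k else 0) := by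
      intro k
      rw [List.count_cons]
      by_cases h : k = d
      · simp [h]; ring
      · have h2 : ¬ d = k := fun he => h he.symm
        simp [h, h2]
    calc ((K.map (fun k => (((d :: ds).count k : Int)) * f k)).sum)
        = ((K.map (fun k => ((ds.count k : Int)) * f k + (if k = d then f k else 0))).sum) := by
          congr 1; exact List.map_congr_left (fun k _ => hstep k)
      _ = ((K.map (fun k => ((ds.count k : Int)) * f k)).sum)
            + ((K.map (fun k => if k = d then f k else 0)).sum) := by
          rw [← List.sum_map_add]
      _ = ((ds.map f).sum) + f d := by
          rw [ih hcov', pvSum_single K hnd d (hcov d (List.mem_cons_self)) f]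
      _ = (((d :: ds).map f).sum) := by simp; ring

theorem pvItems_eq (dirs : List String) :
    (dirs.foldl (fun c d => c.insert d (c.getD d 0 + 1)) (PySem.Dict.empty : PySem.Dict String Int)).items
      = (PySem.Set.ofList dirs).map (fun k => (k, (dirs.count k : Int))) := by
  rw [PySem.Dict.foldl_insert_getD_add_one_eq_counter, PySem.Dict.items_counter]

-- ===== VERDICT (by name: the statement is the Claim_ definition above) =====
theorem followToTile_spec : Claim_equal_followToTile := by
  intro dirs _ _
  unfold Spec_followToTile followToTile followToTile_alt
  dsimp only
  rw [pvFoldA_shift, pvItems_eq, pvFoldB_shift]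
  have hnd : (PySem.Set.ofList dirs).Nodup := PySem.Set.nodup_ofList dirs
  have hcov : ∀ d ∈ dirs, d ∈ PySem.Set.ofList dirs := fun d hd => (PySem.Set.mem_ofList dirs d).mpr hd
  simp only [List.map_map, Function.comp_def]
  rw [pvSum_count _ hnd dirs hcov (fun d => (pvVECTORS.getD d (0,0,0)).1),
      pvSum_count _ hnd dirs hcov (fun d => (pvVECTORS.getD d (0,0,0)).2.1),
      pvSum_count _ hnd dirs hcov (fun d => (pvVECTORS.getD d (0,0,0)).2.2)]
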